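-- pv_equiv track=rewrite | github.com/geometric-intelligence/bispectrum | paper/fiber_search.py | param_indices_for_ell
-- ===== SOURCE A (Python) =====
-- def param_indices_for_ell(ell: int) -> list[int]:
--     idx = 0
--     for lv in range(2, ell):
--         idx += 2 * lv + 1
--         if lv == 2:
--             idx -= 1
--     n_params = 2 * ell + 1
--     if ell == 2:
--         n_params -= 1
--     return list(range(idx, idx + n_params))
-- ===== SOURCE B (Python) =====
-- def param_indices_for_ell(ell: int) -> list[int]:
--     # closed form: sum_{lv=2}^{ell-1}(2*lv+1) = ell*ell - 4, minus 1 for the lv==2 term (only reached when ell >= 3)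
--     start = 0 if ell <= 2 else ell * ell - 5
--     n_params = 2 * ell + 1 - (1 if ell == 2 else 0)
--     return list(range(start, start + n_params))
-- ===== Notes on version B (the rewrite author's own statement) =====
-- stated objective: simpler
-- what changed: Replaces the accumulating loop over range(2, ell) with the closed-form arithmetic-series start index (ell*ell - 5 for ell >= 3, else 0).
import Mathlib
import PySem

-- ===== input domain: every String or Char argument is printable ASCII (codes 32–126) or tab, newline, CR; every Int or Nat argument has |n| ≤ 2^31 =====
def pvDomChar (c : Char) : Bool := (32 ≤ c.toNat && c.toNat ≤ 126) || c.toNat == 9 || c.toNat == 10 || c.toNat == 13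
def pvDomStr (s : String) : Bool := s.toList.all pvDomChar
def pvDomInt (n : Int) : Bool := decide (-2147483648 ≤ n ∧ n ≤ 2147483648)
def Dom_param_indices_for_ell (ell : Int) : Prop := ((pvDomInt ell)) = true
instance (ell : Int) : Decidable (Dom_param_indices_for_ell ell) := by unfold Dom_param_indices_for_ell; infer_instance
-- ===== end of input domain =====

-- B replaces A's accumulating loop by the closed-form series sum (simpler, O(1) start index).

-- ===== PORT A =====
def param_indices_for_ell (ell : Int) : List Int :=
  let idx : Int :=
    (PySem.List.pyRange 2 ell 1).foldl
      (fun idx lv =>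
        let idx := idx + (2 * lv + 1)
        if lv = 2 then idx - 1 else idx) 0
  let n_params : Int := 2 * ell + 1
  let n_params : Int := if ell = 2 then n_params - 1 else n_params
  PySem.List.pyRange idx (idx + n_params) 1

-- ===== PORT B =====
def param_indices_for_ell_alt (ell : Int) : List Int :=
  let start : Int := if ell ≤ 2 then 0 else ell * ell - 5
  let n_params : Int := 2 * ell + 1 - (if ell = 2 then 1 else 0)
  PySem.List.pyRange start (start + n_params) 1

-- ===== PRECONDITION & SPEC =====
def Spec_param_indices_for_ell (ell : Int) (out : List Int) : Prop := out = param_indices_for_ell_alt ell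
instance (ell : Int) (out : List Int) : Decidable (Spec_param_indices_for_ell ell out) := by unfold Spec_param_indices_for_ell; infer_instance

-- ===== CLAIM (what is proved, stated in full; the proofs are below) =====
def Claim_equal_param_indices_for_ell : Prop := ∀ (ell : Int), Dom_param_indices_for_ell ell → Spec_param_indices_for_ell ell (param_indices_for_ell ell)

-- ===== LEMMAS AND PROOFS =====

-- the loop's accumulated value, in closed form
theorem pv_foldl_closed (ell : Int) :
    (PySem.List.pyRange 2 ell 1).foldl
      (fun idx lv =>
        let idx := idx + (2 * lv + 1)
        if lv = 2 then idx - 1 else idx) 0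
    = if ell ≤ 2 then 0 else ell * ell - 5 := by
  by_cases h : ell ≤ 2
  · rw [PySem.List.pyRange_one_eq_nil h]
    simp [h]
  · -- induct on ell - 3 as a natural number
    obtain ⟨n, hn⟩ : ∃ n : ℕ, ell = 3 + (n : Int) := ⟨(ell - 3).toNat, by omega⟩
    subst hn
    induction n with
    | zero => decide
    | succ k ih =>
      have hk : ¬ ((3 : Int) + (k : Int) ≤ 2) := by omega
      have : (3 : Int) + ((k : ℕ) + 1 : ℕ) = (3 + (k : Int)) + 1 := by push_cast; ring
      rw [this, PySem.List.pyRange_one_succ_right (by omega), List.foldl_append, ih hk]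
      have h2 : ¬ (3 + (k : Int) ≤ 2) := by omega
      have h3 : ¬ ((3 : Int) + (k : Int) + 1 ≤ 2) := by omega
      have h4 : (3 : Int) + (k : Int) ≠ 2 := by omega
      simp only [List.foldl_cons, List.foldl_nil, if_neg h2, if_neg h3, if_neg h4]
      ring

-- ===== VERDICT (by name: the statement is the Claim_ definition above) =====
theorem param_indices_for_ell_spec : Claim_equal_param_indices_for_ell := by
  intro ell _
  unfold Spec_param_indices_for_ell param_indices_for_ell param_indices_for_ell_alt
  rw [pv_foldl_closed]
  rcases eq_or_ne ell 2 with h | h <;> simp [h]
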